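-- pv_equiv track=rewrite | github.com/dewanthenmalai/AdventOfCodeDewan | 2024/Day9/Puzzle2.py | find_free_block
-- ===== SOURCE A (Python) =====
-- def find_free_block(disk, _len):
--     for i,c in enumerate(disk):
--         if c == '.':
--             size = 0
--             j = i
--             while  j < len(disk) and disk[j] == '.':
--                 size += 1
--                 j += 1
--             if size >= _len:
--                 return i
--     return None
-- ===== SOURCE B (Python) =====
-- def find_free_block(disk, _len):
--     # Single left-to-right pass: 'start' is the start of the current free run
--     # (reset past any non-dot cell); return it as soon as the run reaches _len.
--     start = 0
--     for idx, c in enumerate(disk):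
--         if c != '.':
--             start = idx + 1
--         elif idx - start + 1 >= _len:
--             return start
--     return None
-- ===== Notes on version B (the rewrite author's own statement) =====
-- stated objective: simpler
-- what changed: Instead of re-scanning the whole free run from every '.' cell with an inner while loop, B makes a single pass that tracks the start of the current free run and returns it the moment the run reaches _len.
import Mathlib
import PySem

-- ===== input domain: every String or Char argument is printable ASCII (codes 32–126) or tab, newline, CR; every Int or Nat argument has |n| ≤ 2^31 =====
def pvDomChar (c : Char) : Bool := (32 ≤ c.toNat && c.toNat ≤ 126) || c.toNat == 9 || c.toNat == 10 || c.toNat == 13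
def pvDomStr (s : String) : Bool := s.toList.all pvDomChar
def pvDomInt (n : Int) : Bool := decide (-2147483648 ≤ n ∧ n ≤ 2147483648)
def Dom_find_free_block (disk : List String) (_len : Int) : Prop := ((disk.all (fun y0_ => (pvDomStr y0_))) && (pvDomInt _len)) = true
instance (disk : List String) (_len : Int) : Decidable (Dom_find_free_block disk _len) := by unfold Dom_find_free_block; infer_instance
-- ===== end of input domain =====

-- B replaces A's rescan of the free run at every dot cell by one pass that tracks the
-- current run's start; same return value everywhere (objective: simpler / linear pass).

-- ===== PORT A =====
-- inner `while j < len(disk) and disk[j] == '.'` loop; guard keeps the index in range,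
-- so `getD j ""` reads exactly the Python disk[j]
def fa_while (disk : List String) (j size : Nat) : Nat :=
  if j < disk.length ∧ disk.getD j "" == "." then
    fa_while disk (j + 1) (size + 1)
  else size
termination_by disk.length - j
decreasing_by omega

-- outer `for i, c in enumerate(disk)` loop as index recursion
def fa_loop (disk : List String) (_len : Int) (i : Nat) : Option Int :=
  if i < disk.length then
    if disk.getD i "" == "." then
      if (fa_while disk i 0 : Int) ≥ _len then some i
      else fa_loop disk _len (i + 1)
    else fa_loop disk _len (i + 1)
  else none
termination_by disk.length - i
decreasing_by all_goals omega

def find_free_block (disk : List String) (_len : Int) : Option Int :=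
  fa_loop disk _len 0

-- ===== PORT B =====
def fb_loop (_len : Int) (xs : List (Int × String)) (start : Int) : Option Int :=
  match xs with
  | [] => none
  | (idx, c) :: rest =>
    if c != "." then fb_loop _len rest (idx + 1)
    else if idx - start + 1 ≥ _len then some start
    else fb_loop _len rest start

def find_free_block_alt (disk : List String) (_len : Int) : Option Int :=
  fb_loop _len (PySem.List.enumerate disk 0) 0

-- ===== PRECONDITION & SPEC =====
def Spec_find_free_block (disk : List String) (_len : Int) (out : Option Int) : Prop := out = find_free_block_alt disk _len
instance (disk : List String) (_len : Int) (out : Option Int) : Decidable (Spec_find_free_block disk _len out) := by unfold Spec_find_free_block; infer_instance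

-- ===== CLAIM (what is proved, stated in full; the proofs are below) =====
def Claim_equal_find_free_block : Prop := ∀ (disk : List String) (_len : Int), Dom_find_free_block disk _len → Spec_find_free_block disk _len (find_free_block disk _len)

-- ===== LEMMAS AND PROOFS =====

-- number of leading '.' cells of a suffix
def dotsOf (l : List String) : Nat := (l.takeWhile (· == ".")).length

theorem dots_le (l : List String) : dotsOf l ≤ l.length :=
  (List.takeWhile_prefix _).length_le

theorem dots_cons_dot (l : List String) : dotsOf ("." :: l) = dotsOf l + 1 := by
  simp [dotsOf, List.takeWhile]

theorem dots_cons_not (c : String) (l : List String) (h : c ≠ ".") :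
    dotsOf (c :: l) = 0 := by
  have hb : (c == ".") = false := by simp [h]
  simp [dotsOf, List.takeWhile, hb]

theorem drop_cons (disk : List String) (i : Nat) (h : i < disk.length) :
    disk.drop i = disk[i] :: disk.drop (i + 1) :=
  List.drop_eq_getElem_cons h

theorem getD_dot (disk : List String) (i : Nat) (h : i < disk.length)
    (hd : disk[i] = ".") : (disk.getD i "" == ".") = true := by
  simp [List.getD, List.getElem?_eq_getElem h, hd]

theorem getD_not (disk : List String) (i : Nat) (h : i < disk.length)
    (hd : disk[i] ≠ ".") : ¬ ((disk.getD i "" == ".") = true) := by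
  simp [List.getD, List.getElem?_eq_getElem h, hd]

theorem fa_while_eq (disk : List String) (j size : Nat) :
    fa_while disk j size = size + dotsOf (disk.drop j) := by
  by_cases hlt : j < disk.length
  · by_cases hd : disk[j] = "."
    · rw [fa_while, if_pos ⟨hlt, getD_dot disk j hlt hd⟩,
          fa_while_eq disk (j+1) (size+1),
          drop_cons disk j hlt, hd, dots_cons_dot]
      omega
    · have hno : ¬ (j < disk.length ∧ disk.getD j "" == ".") := by
        intro hc; exact getD_not disk j hlt hd hc.2
      rw [fa_while, if_neg hno, drop_cons disk j hlt, dots_cons_not _ _ hd]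
      omega
  · have hno : ¬ (j < disk.length ∧ disk.getD j "" == ".") := by
      intro hc; exact hlt hc.1
    rw [fa_while, if_neg hno, List.drop_eq_nil_of_le (by omega)]
    simp [dotsOf]
termination_by disk.length - j
decreasing_by omega

-- enumerate of a suffix, one step
theorem enum_drop_cons (disk : List String) (i : Nat) (h : i < disk.length) :
    PySem.List.enumerate (disk.drop i) (i : Int)
      = ((i : Int), disk[i]) :: PySem.List.enumerate (disk.drop (i + 1)) ((i : Int) + 1) := by
  rw [drop_cons disk i h, PySem.List.enumerate_cons]

-- A skips through a too-short free run
theorem fa_run (disk : List String) (_len : Int) (i : Nat)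
    (hlen : (dotsOf (disk.drop i) : Int) < _len) :
    fa_loop disk _len i = fa_loop disk _len (i + dotsOf (disk.drop i)) := by
  by_cases hlt : i < disk.length
  · by_cases hd : disk[i] = "."
    · have hstep : dotsOf (disk.drop i) = dotsOf (disk.drop (i + 1)) + 1 := by
        rw [drop_cons disk i hlt, hd, dots_cons_dot]
      rw [fa_loop, if_pos hlt, if_pos (getD_dot disk i hlt hd), fa_while_eq disk i 0]
      have hneg : ¬ ((↑(0 + dotsOf (disk.drop i)) : Int) ≥ _len) := by push_cast; omega
      rw [if_neg hneg,
          fa_run disk _len (i + 1) (by omega)]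
      have e : i + 1 + dotsOf (disk.drop (i + 1)) = i + dotsOf (disk.drop i) := by omega
      rw [e]
    · have h0 : dotsOf (disk.drop i) = 0 := by
        rw [drop_cons disk i hlt, dots_cons_not _ _ hd]
      simp [h0]
  · have h0 : dotsOf (disk.drop i) = 0 := by
      rw [List.drop_eq_nil_of_le (by omega)]; simp [dotsOf]
    simp [h0]
termination_by disk.length - i
decreasing_by omega

-- B walks a free run: either the run reaches length _len and B reports its start s,
-- or B leaves the run with the state reset to the first position past it
theorem fb_run (disk : List String) (_len : Int) (i : Nat) (s : Int)
    (hs : (i : Int) - s < _len) :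
    fb_loop _len (PySem.List.enumerate (disk.drop i) (i : Int)) s
      = if (i : Int) - s + dotsOf (disk.drop i) ≥ _len then some s
        else fb_loop _len
              (PySem.List.enumerate (disk.drop (i + dotsOf (disk.drop i)))
                ((i : Int) + dotsOf (disk.drop i)))
              ((i : Int) + dotsOf (disk.drop i)) := by
  by_cases hlt : i < disk.length
  · by_cases hd : disk[i] = "."
    · have hstep : dotsOf (disk.drop i) = dotsOf (disk.drop (i + 1)) + 1 := by
        rw [drop_cons disk i hlt, hd, dots_cons_dot]
      rw [enum_drop_cons disk i hlt]
      simp only [fb_loop, hd]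
      rw [if_neg (by simp)]
      by_cases hhit : (i : Int) - s + 1 ≥ _len
      · rw [if_pos hhit, if_pos (by push_cast [hstep]; omega)]
      · rw [if_neg hhit]
        have hrec := fb_run disk _len (i + 1) s (by push_cast at hhit ⊢; omega)
        push_cast at hrec
        rw [hrec]
        by_cases hfin : (i : Int) - s + ↑(dotsOf (disk.drop i)) ≥ _len
        · rw [if_pos hfin, if_pos (by push_cast [hstep] at hfin ⊢; omega)]
        · rw [if_neg hfin, if_neg (by push_cast [hstep] at hfin ⊢; omega)]
          have e1 : i + 1 + dotsOf (disk.drop (i + 1)) = i + dotsOf (disk.drop i) := by omega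
          have e2 : ((i : Int) + 1 + ↑(dotsOf (disk.drop (i + 1))))
              = (i : Int) + ↑(dotsOf (disk.drop i)) := by push_cast [hstep]; ring
          rw [e1, e2]
    · have h0 : dotsOf (disk.drop i) = 0 := by
        rw [drop_cons disk i hlt, dots_cons_not _ _ hd]
      rw [h0, if_neg (by omega)]
      simp only [Nat.cast_zero, add_zero]
      rw [enum_drop_cons disk i hlt]
      simp only [fb_loop]
      have hne : (disk[i] != ".") = true := by simp [hd]
      rw [if_pos hne, if_pos hne]
  · have hnil : disk.drop i = [] := List.drop_eq_nil_of_le (by omega)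
    have h0 : dotsOf (disk.drop i) = 0 := by rw [hnil]; simp [dotsOf]
    rw [h0, if_neg (by omega)]
    simp [hnil, fb_loop]
termination_by disk.length - i
decreasing_by omega

-- main invariant: at a fresh state (start = current index) B's scan equals A's scan
theorem main_inv (disk : List String) (_len : Int) (i : Nat) :
    fb_loop _len (PySem.List.enumerate (disk.drop i) (i : Int)) (i : Int)
      = fa_loop disk _len i := by
  by_cases hlt : i < disk.length
  · by_cases hd : disk[i] = "."
    · have hdots1 : 1 ≤ dotsOf (disk.drop i) := by
        rw [drop_cons disk i hlt, hd, dots_cons_dot]; omega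
      have hstep : dotsOf (disk.drop i) = dotsOf (disk.drop (i + 1)) + 1 := by
        rw [drop_cons disk i hlt, hd, dots_cons_dot]
      rw [fa_loop, if_pos hlt, if_pos (getD_dot disk i hlt hd), fa_while_eq disk i 0]
      by_cases hpos : 0 < _len
      · rw [fb_run disk _len i i (by omega)]
        by_cases hbig : ((↑(0 + dotsOf (disk.drop i)) : Int) ≥ _len)
        · rw [if_pos (by push_cast at hbig ⊢; omega), if_pos hbig]
        · rw [if_neg (by push_cast at hbig ⊢; omega), if_neg hbig]
          have hle : i + dotsOf (disk.drop i) ≤ disk.length := by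
            have h1 := dots_le (disk.drop i)
            rw [List.length_drop] at h1; omega
          have hmain := main_inv disk _len (i + dotsOf (disk.drop i))
          push_cast at hmain
          rw [hmain,
              fa_run disk _len (i + 1) (by push_cast at hbig ⊢; omega)]
          have e : i + 1 + dotsOf (disk.drop (i + 1)) = i + dotsOf (disk.drop i) := by omega
          rw [e]
      · -- _len ≤ 0 : both return i at once
        rw [enum_drop_cons disk i hlt]
        simp only [fb_loop, hd]
        rw [if_neg (by simp), if_pos (by omega), if_pos (by push_cast; omega)]
    · rw [fa_loop, if_pos hlt, if_neg (getD_not disk i hlt hd),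
          enum_drop_cons disk i hlt]
      simp only [fb_loop]
      have hne : (disk[i] != ".") = true := by simp [hd]
      rw [if_pos hne]
      have hmain := main_inv disk _len (i + 1)
      push_cast at hmain ⊢
      exact hmain
  · have hnil : disk.drop i = [] := List.drop_eq_nil_of_le (by omega)
    simp [fa_loop, hlt, hnil, fb_loop]
termination_by disk.length - i
decreasing_by all_goals omega

-- ===== VERDICT (by name: the statement is the Claim_ definition above) =====
theorem find_free_block_spec : Claim_equal_find_free_block := by
  intro disk _len _
  unfold Spec_find_free_block find_free_block find_free_block_alt
  have := main_inv disk _len 0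
  simpa using this.symm
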